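-- pv_equiv track=rewrite | github.com/mhalushka/miRge3.0 | mirge/libs/trnaFragments.py | locationOfStartEnd
-- ===== SOURCE A (Python) =====
-- def locationOfStartEnd(dashedSeq):
--     leftCount = 0
--     for i in dashedSeq:
--         if i == '-':
--             leftCount = leftCount + 1
--         else:
--             break
--     rightCount = 0
--     for i in dashedSeq[::-1]:
--         if i == '-':
--             rightCount = rightCount + 1
--         else:
--             break
--     return (leftCount, rightCount)
-- ===== SOURCE B (Python) =====
-- def locationOfStartEnd(dashedSeq):
--     # Binary search for the largest k such that the first k characters are all
--     # dashes: the predicate s[:k] == '-'*k is monotone (downward closed) in k,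
--     # so its maximum is found in O(log n) probes. Same on the reversed string
--     # for the trailing run.
--     def runLen(s):
--         lo, hi = 0, len(s)
--         while lo < hi:
--             mid = (lo + hi + 1) // 2
--             if s[:mid] == '-' * mid:
--                 lo = mid
--             else:
--                 hi = mid - 1
--         return lo
--     return (runLen(dashedSeq), runLen(dashedSeq[::-1]))
-- ===== Notes on version B (the rewrite author's own statement) =====
-- stated objective: alternative
-- what changed: Replaces A's two linear break-loops with a binary search for the largest k such that the first k characters are all dashes (a monotone prefix predicate, checked by comparing the prefix slice against a built dash run), applied to the string and to its reverse; no character-by-character counter is maintained.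
import Mathlib
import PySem

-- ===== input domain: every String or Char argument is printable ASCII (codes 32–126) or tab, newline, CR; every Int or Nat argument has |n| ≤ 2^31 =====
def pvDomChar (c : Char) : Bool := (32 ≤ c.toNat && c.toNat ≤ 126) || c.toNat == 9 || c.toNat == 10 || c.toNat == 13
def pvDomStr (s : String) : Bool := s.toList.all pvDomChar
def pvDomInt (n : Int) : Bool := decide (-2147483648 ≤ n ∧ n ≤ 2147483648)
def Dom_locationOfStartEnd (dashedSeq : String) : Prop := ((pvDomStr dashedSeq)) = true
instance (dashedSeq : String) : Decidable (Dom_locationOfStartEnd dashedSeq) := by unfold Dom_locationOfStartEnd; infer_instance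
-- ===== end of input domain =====

-- B replaces A's two linear break-loops by a binary search for the largest k such that the first k
-- characters are all dashes (a monotone predicate), on the string and on its reverse (alternative; no speed claim).

-- ===== PORT A =====
-- the 'for i in …: if i == '-': count += 1 else: break' loop, transliterated
def pvCountLoop_locationOfStartEnd : List Char → Int → Int
  | [], acc => acc
  | c :: rest, acc => if c = '-' then pvCountLoop_locationOfStartEnd rest (acc + 1) else acc

def locationOfStartEnd (dashedSeq : String) : Int × Int :=
  let leftCount := pvCountLoop_locationOfStartEnd dashedSeq.toList 0
  -- dashedSeq[::-1] is the reversed string (exact: full-step -1 slice = reverse)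
  let rightCount := pvCountLoop_locationOfStartEnd dashedSeq.toList.reverse 0
  (leftCount, rightCount)

-- ===== PORT B =====
-- the 'while lo < hi' binary search of Source B; the prefix-slice comparison against the built dash run
-- is ported as take/replicate
-- (exact: 0 ≤ mid ≤ len s, so the slice is the prefix and '-'*mid is replicate)
def pvRunLen_locationOfStartEnd (cs : List Char) (lo hi : Nat) : Nat :=
  if _h : lo < hi then
    let mid := (lo + hi + 1) / 2
    if cs.take mid = List.replicate mid '-' then
      pvRunLen_locationOfStartEnd cs mid hi
    else
      pvRunLen_locationOfStartEnd cs lo (mid - 1)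
  else lo
termination_by hi - lo
decreasing_by all_goals omega

def locationOfStartEnd_alt (dashedSeq : String) : Int × Int :=
  let cs := dashedSeq.toList
  ((pvRunLen_locationOfStartEnd cs 0 cs.length : Int),
   (pvRunLen_locationOfStartEnd cs.reverse 0 cs.reverse.length : Int))

-- ===== PRECONDITION & SPEC =====
def Spec_locationOfStartEnd (dashedSeq : String) (out : Int × Int) : Prop := out = locationOfStartEnd_alt dashedSeq
instance (dashedSeq : String) (out : Int × Int) : Decidable (Spec_locationOfStartEnd dashedSeq out) := by unfold Spec_locationOfStartEnd; infer_instance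

-- ===== CLAIM (what is proved, stated in full; the proofs are below) =====
def Claim_equal_locationOfStartEnd : Prop := ∀ (dashedSeq : String), Dom_locationOfStartEnd dashedSeq → Spec_locationOfStartEnd dashedSeq (locationOfStartEnd dashedSeq)

-- ===== LEMMAS AND PROOFS =====
-- the all-dash-prefix predicate is 'k ≤ length of the leading dash run' (for k within the string)
theorem pvTake_replicate_iff (cs : List Char) :
    ∀ k : Nat, k ≤ cs.length →
      (cs.take k = List.replicate k '-' ↔ k ≤ (cs.takeWhile (· = '-')).length) := by
  induction cs with
  | nil =>
    intro k hk
    have : k = 0 := Nat.le_zero.mp hk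
    subst this; simp
  | cons c rest ih =>
    intro k hk
    cases k with
    | zero => simp
    | succ j =>
      by_cases hc : c = '-'
      · subst hc
        have hk' : j ≤ rest.length := by simp only [List.length_cons] at hk; omega
        rw [List.take_succ_cons, List.replicate_succ, List.takeWhile_cons]
        simp [ih j hk']
      · rw [List.take_succ_cons, List.replicate_succ, List.takeWhile_cons]
        simp [hc]

-- the binary search returns the length L of the leading dash run whenever lo ≤ L ≤ hi ≤ length
theorem pvRunLen_eq_aux (cs : List Char) : ∀ d lo hi : Nat, hi - lo = d →
    lo ≤ (cs.takeWhile (· = '-')).length → (cs.takeWhile (· = '-')).length ≤ hi →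
    hi ≤ cs.length →
    pvRunLen_locationOfStartEnd cs lo hi = (cs.takeWhile (· = '-')).length := by
  intro d
  induction d using Nat.strong_induction_on with
  | _ d ih =>
    intro lo hi hd hlo hhi' hlen
    rw [pvRunLen_locationOfStartEnd]
    by_cases h : lo < hi
    · simp only [dif_pos h]
      set L := (cs.takeWhile (· = '-')).length with hL
      set mid := (lo + hi + 1) / 2 with hmid
      have hmid1 : lo < mid := by omega
      have hmid2 : mid ≤ hi := by omega
      by_cases hp : cs.take mid = List.replicate mid '-'
      · have hmL : mid ≤ L := (pvTake_replicate_iff cs mid (by omega)).mp hp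
        simp only [if_pos hp]
        exact ih (hi - mid) (by omega) mid hi rfl hmL hhi' hlen
      · have hmL : ¬ mid ≤ L := fun hle =>
          hp ((pvTake_replicate_iff cs mid (by omega)).mpr hle)
        simp only [if_neg hp]
        exact ih (mid - 1 - lo) (by omega) lo (mid - 1) rfl hlo (by omega) (by omega)
    · simp only [dif_neg h]; omega

-- A's loop counts the leading dash run
theorem pvCountLoop_eq (cs : List Char) : ∀ acc : Int,
    pvCountLoop_locationOfStartEnd cs acc = acc + ((cs.takeWhile (· = '-')).length : Int) := by
  induction cs with
  | nil => intro acc; simp [pvCountLoop_locationOfStartEnd]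
  | cons c rest ih =>
    intro acc
    by_cases h : c = '-'
    · simp [pvCountLoop_locationOfStartEnd, h, ih]; ring
    · simp [pvCountLoop_locationOfStartEnd, h]

-- ===== VERDICT (by name: the statement is the Claim_ definition above) =====
theorem pvRunLen_eq (cs : List Char) :
    pvRunLen_locationOfStartEnd cs 0 cs.length = (cs.takeWhile (· = '-')).length :=
  pvRunLen_eq_aux cs _ 0 cs.length rfl (Nat.zero_le _)
    (List.takeWhile_prefix _).length_le le_rfl

theorem locationOfStartEnd_spec : Claim_equal_locationOfStartEnd := by
  intro s _
  show _ = _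
  have h1 := pvRunLen_eq s.toList
  have h2 := pvRunLen_eq s.toList.reverse
  simp [locationOfStartEnd, locationOfStartEnd_alt, pvCountLoop_eq]
  simp at h1 h2
  omega
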